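-- pv_equiv track=rewrite | github.com/anshul4117/DataVisualization | 9_may_python/Q25_word_frequency_file.py | count_word_frequencies
-- ===== SOURCE A (Python) =====
-- def count_word_frequencies(content):
--     """Count word frequencies and store in a dictionary."""
--     frequency_dict = {}
--
--     # Clean and split content into words
--     words = content.lower().split()
--
--     for word in words:
--         # Remove punctuation from word
--         cleaned_word = ""
--         for char in word:
--             if char.isalnum():
--                 cleaned_word += char
--
--         if cleaned_word:
--             if cleaned_word in frequency_dict:
--                 frequency_dict[cleaned_word] += 1
--             else:
--                 frequency_dict[cleaned_word] = 1
--
--     return frequency_dict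
-- ===== SOURCE B (Python) =====
-- def count_word_frequencies(content):
--     """Count word frequencies in one character-level pass: alnum chars extend
--     the current word, whitespace flushes it into the counter, anything else
--     is skipped (punctuation never breaks a word, just as in split-then-clean)."""
--     freq = {}
--     cur = []
--     for ch in content.lower():
--         if ch.isalnum():
--             cur.append(ch)
--         elif ch.isspace():
--             if cur:
--                 w = "".join(cur)
--                 freq[w] = freq.get(w, 0) + 1
--             cur = []
--     if cur:
--         w = "".join(cur)
--         freq[w] = freq.get(w, 0) + 1
--     return freq
-- ===== Notes on version B (the rewrite author's own statement) =====
-- stated objective: alternative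
-- what changed: B replaces A's two-level pass (split into words, then an inner per-word loop stripping punctuation, then a dict update) by a single character-level scan over the lowered text that grows the current word on alnum chars, flushes it into the counter on whitespace and skips other chars.
import Mathlib
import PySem

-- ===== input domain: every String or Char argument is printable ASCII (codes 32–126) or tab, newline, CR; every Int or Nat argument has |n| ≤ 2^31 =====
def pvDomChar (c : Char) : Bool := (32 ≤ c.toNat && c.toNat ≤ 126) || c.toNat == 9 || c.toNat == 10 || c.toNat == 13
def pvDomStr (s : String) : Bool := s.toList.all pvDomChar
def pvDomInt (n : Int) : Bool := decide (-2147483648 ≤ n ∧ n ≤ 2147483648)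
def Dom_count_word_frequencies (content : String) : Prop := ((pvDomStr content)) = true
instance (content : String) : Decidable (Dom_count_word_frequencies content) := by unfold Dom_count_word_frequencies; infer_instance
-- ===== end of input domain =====

-- B replaces A's split-then-clean-each-word double pass by a single character-level
-- scan with a current-word accumulator (objective: alternative decomposition).

-- ===== PORT A =====
-- A: words = content.lower().split(); per word build cleaned_word char by char
-- (the inner for/if loop), then count it in frequency_dict via the contains check.
def count_word_frequencies (content : String) : List (String × Int) :=
  ((PySem.Str.split₀ (PySem.Str.lower content)).foldl
    (fun (d : PySem.Dict String Int) word =>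
      let cleaned := word.toList.foldl
        (fun cw c => if PySem.Chars.isalnum c then cw ++ [c] else cw) ([] : List Char)
      if cleaned.isEmpty = false then
        let key := String.ofList cleaned
        if d.contains key then d.modify key 0 (· + 1) else d.insert key 1
      else d)
    PySem.Dict.empty).items

-- ===== PORT B =====
-- B: one fold over the characters of content.lower(): alnum extends cur,
-- whitespace flushes cur into freq ("if cur: freq[w] = freq.get(w,0)+1"),
-- anything else is skipped; pvFinishB is the trailing "if cur:" flush.
def pvFlushB (d : PySem.Dict String Int) (cur : List Char) : PySem.Dict String Int :=
  if cur.isEmpty then d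
  else
    let w := String.ofList cur
    d.insert w (d.getD w 0 + 1)

def pvStepB (st : PySem.Dict String Int × List Char) (c : Char) :
    PySem.Dict String Int × List Char :=
  if PySem.Chars.isalnum c then (st.1, st.2 ++ [c])
  else if PySem.Chars.isspace c then (pvFlushB st.1 st.2, [])
  else st

def pvFinishB (st : PySem.Dict String Int × List Char) : PySem.Dict String Int :=
  pvFlushB st.1 st.2

def count_word_frequencies_alt (content : String) : List (String × Int) :=
  (pvFinishB ((PySem.Chars.lower content.toList).foldl pvStepB
    (PySem.Dict.empty, ([] : List Char)))).items

-- ===== PRECONDITION & SPEC =====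
def Spec_count_word_frequencies (content : String) (out : List (String × Int)) : Prop := out = count_word_frequencies_alt content
instance (content : String) (out : List (String × Int)) : Decidable (Spec_count_word_frequencies content out) := by unfold Spec_count_word_frequencies; infer_instance

-- ===== CLAIM (what is proved, stated in full; the proofs are below) =====
def Claim_equal_count_word_frequencies : Prop := ∀ (content : String), Dom_count_word_frequencies content → Spec_count_word_frequencies content (count_word_frequencies content)

-- ===== LEMMAS AND PROOFS =====

-- alphanumeric characters are never whitespace (both are explicit code ranges)
lemma alnum_not_space (c : Char) (h : PySem.Chars.isalnum c = true) :
    PySem.Chars.isspace c = false := by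
  simp [PySem.Chars.isalnum, PySem.Chars.isalpha, PySem.Chars.isupper,
        PySem.Chars.islower, PySem.Chars.isdigit, Char.le_def,
        UInt32.le_iff_toNat_le] at h
  simp only [PySem.Chars.isspace] at *
  simp
  omega

-- unfolding equations for split₀.go
lemma go_nil (cur : List Char) (acc : List (List Char)) :
    PySem.Chars.split₀.go [] cur acc =
      if cur.isEmpty then acc.reverse else (cur.reverse :: acc).reverse := by
  rw [PySem.Chars.split₀.go]

lemma go_cons (c : Char) (rest cur : List Char) (acc : List (List Char)) :
    PySem.Chars.split₀.go (c :: rest) cur acc =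
      if PySem.Chars.isspace c then
        (if cur.isEmpty then PySem.Chars.split₀.go rest [] acc
         else PySem.Chars.split₀.go rest [] (cur.reverse :: acc))
      else PySem.Chars.split₀.go rest (c :: cur) acc := by
  rw [PySem.Chars.split₀.go]

-- split₀.go with an output accumulator just prepends its reverse
lemma go_acc (m : List Char) (cur : List Char) (acc : List (List Char)) :
    PySem.Chars.split₀.go m cur acc = acc.reverse ++ PySem.Chars.split₀.go m cur [] := by
  induction m generalizing cur acc with
  | nil =>
      rw [go_nil, go_nil]
      by_cases h : cur.isEmpty = true <;> simp [h]
  | cons c rest ih =>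
      rw [go_cons, go_cons]
      by_cases hs : PySem.Chars.isspace c = true
      · rw [if_pos hs, if_pos hs]
        by_cases h : cur.isEmpty = true
        · rw [if_pos h, if_pos h]
          exact ih [] acc
        · rw [if_neg h, if_neg h]
          rw [ih [] (cur.reverse :: acc), ih [] [cur.reverse]]
          simp
      · rw [if_neg hs, if_neg hs]
        exact ih (c :: cur) acc

-- A's per-word step, written over the word's character list
def pvStepA (d : PySem.Dict String Int) (l : List Char) : PySem.Dict String Int :=
  let cl := l.filter PySem.Chars.isalnum
  if cl.isEmpty = false then
    d.insert (String.ofList cl) (d.getD (String.ofList cl) 0 + 1)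
  else d

-- main simulation: B's char-level fold computes A's fold over the split₀ words
lemma main_sim (m : List Char) (cur : List Char) (d : PySem.Dict String Int) :
    pvFinishB (m.foldl pvStepB (d, cur.reverse.filter PySem.Chars.isalnum))
      = (PySem.Chars.split₀.go m cur []).foldl pvStepA d := by
  induction m generalizing cur d with
  | nil =>
      rw [List.foldl_nil, go_nil]
      by_cases h : cur.isEmpty = true
      · rw [if_pos h]
        simp at h
        simp [h, pvFinishB, pvFlushB]
      · rw [if_neg h]
        simp only [List.reverse_cons, List.reverse_nil, List.nil_append,
          List.foldl_cons, List.foldl_nil]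
        simp only [pvFinishB, pvFlushB, pvStepA]
        by_cases hf : (cur.reverse.filter PySem.Chars.isalnum).isEmpty = true
        · rw [hf]; simp
        · have hf' : (cur.reverse.filter PySem.Chars.isalnum).isEmpty = false := by
            simpa using hf
          rw [hf']; simp
  | cons c rest ih =>
      rw [List.foldl_cons, go_cons]
      simp only [pvStepB]
      by_cases ha : PySem.Chars.isalnum c = true
      · have hs := alnum_not_space c ha
        rw [if_pos ha, hs, if_neg (by simp)]
        have h2 := ih (c :: cur) d
        rw [← h2]
        simp [List.filter_append, ha]
      · rw [if_neg ha]
        by_cases hs : PySem.Chars.isspace c = true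
        · rw [if_pos hs, if_pos hs]
          by_cases h : cur.isEmpty = true
          · rw [if_pos h]
            simp at h
            have h2 := ih [] d
            simp only [List.reverse_nil, List.filter_nil] at h2
            rw [← h2]
            simp [h, pvFlushB]
          · rw [if_neg h]
            have h2 := ih [] (pvFlushB d (cur.reverse.filter PySem.Chars.isalnum))
            simp only [List.reverse_nil, List.filter_nil] at h2
            rw [h2, go_acc rest [] [cur.reverse]]
            simp only [List.reverse_cons, List.reverse_nil, List.nil_append,
              List.singleton_append, List.foldl_cons]
            congr 1
            simp only [pvFlushB, pvStepA]
            by_cases hf : (cur.reverse.filter PySem.Chars.isalnum).isEmpty = true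
            · rw [hf]; simp
            · have hf' : (cur.reverse.filter PySem.Chars.isalnum).isEmpty = false := by
                simpa using hf
              rw [hf']; simp
        · rw [if_neg hs, if_neg hs]
          have h2 := ih (c :: cur) d
          rw [← h2]
          simp [List.filter_append, ha]

-- A's loop body equals pvStepA on the word's characters
lemma bodyA_eq (d : PySem.Dict String Int) (l : List Char) :
    (let cleaned := l.foldl
        (fun cw c => if PySem.Chars.isalnum c then cw ++ [c] else cw) ([] : List Char)
     if cleaned.isEmpty = false then
       let key := String.ofList cleaned
       if d.contains key then d.modify key 0 (· + 1) else d.insert key 1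
     else d) = pvStepA d l := by
  have hf : l.foldl (fun cw c => if PySem.Chars.isalnum c then cw ++ [c] else cw)
      ([] : List Char) = l.filter PySem.Chars.isalnum := by
    simpa using PySem.List.foldl_append_if PySem.Chars.isalnum id l []
  simp only [hf, pvStepA, PySem.Dict.modify]
  by_cases he : (l.filter PySem.Chars.isalnum).isEmpty = false
  · simp only [he, if_true]
    by_cases hc : d.contains (String.ofList (l.filter PySem.Chars.isalnum))
    · simp [hc]
    · simp only [hc, Bool.false_eq_true, if_false]
      congr 1
      rw [PySem.Dict.getD_of_not_contains _ _ (by simpa using hc)]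
      omega
  · simp [he]

-- ===== VERDICT (by name: the statement is the Claim_ definition above) =====
theorem count_word_frequencies_spec : Claim_equal_count_word_frequencies := by
  intro content _
  show count_word_frequencies content = count_word_frequencies_alt content
  unfold count_word_frequencies count_word_frequencies_alt
  have hw : PySem.Str.split₀ (PySem.Str.lower content)
      = (PySem.Chars.split₀ (PySem.Chars.lower content.toList)).map String.ofList := by
    have h1 := PySem.Str.split₀_map_toList (PySem.Str.lower content)
    rw [PySem.Str.toList_lower] at h1
    rw [← h1, List.map_map]
    simp only [Function.comp_def, String.ofList_toList, List.map_id']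
  rw [hw, List.foldl_map]
  have hsim := main_sim (PySem.Chars.lower content.toList) [] PySem.Dict.empty
  simp only [List.reverse_nil, List.filter_nil] at hsim
  rw [show PySem.Chars.split₀ (PySem.Chars.lower content.toList)
      = PySem.Chars.split₀.go (PySem.Chars.lower content.toList) [] [] from rfl, hsim]
  congr 2
  funext d w
  simpa using bodyA_eq d w
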